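-- pv_equiv track=rewrite | github.com/Hoplon-AI/Platform-dev | backend/workers/enrichment_worker.py | _get_property_pk_column
-- ===== SOURCE A (Python) =====
-- from typing import Any, Optional
--
-- def _get_property_pk_column(row: dict[str, Any], available_columns: set[str]) -> Optional[str]:
--     candidates = ["property_id", "id", "property_reference"]
--     for col in candidates:
--         if col in row and col in available_columns:
--             return col
--     for col in candidates:
--         if col in row:
--             return col
--     return None
-- ===== SOURCE B (Python) =====
-- from typing import Any, Optional
--
-- def _get_property_pk_column(row: dict[str, Any], available_columns: set[str]) -> Optional[str]:
--     fallback = None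
--     for col in ["property_id", "id", "property_reference"]:
--         if col in row:
--             if col in available_columns:
--                 return col
--             if fallback is None:
--                 fallback = col
--     return fallback
-- ===== Notes on version B (the rewrite author's own statement) =====
-- stated objective: simpler
-- what changed: Replaced A's two sequential passes over the candidate list with a single pass that returns immediately on a candidate present in both row and available_columns and otherwise threads the first row-present candidate as a fallback accumulator.
import Mathlib
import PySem

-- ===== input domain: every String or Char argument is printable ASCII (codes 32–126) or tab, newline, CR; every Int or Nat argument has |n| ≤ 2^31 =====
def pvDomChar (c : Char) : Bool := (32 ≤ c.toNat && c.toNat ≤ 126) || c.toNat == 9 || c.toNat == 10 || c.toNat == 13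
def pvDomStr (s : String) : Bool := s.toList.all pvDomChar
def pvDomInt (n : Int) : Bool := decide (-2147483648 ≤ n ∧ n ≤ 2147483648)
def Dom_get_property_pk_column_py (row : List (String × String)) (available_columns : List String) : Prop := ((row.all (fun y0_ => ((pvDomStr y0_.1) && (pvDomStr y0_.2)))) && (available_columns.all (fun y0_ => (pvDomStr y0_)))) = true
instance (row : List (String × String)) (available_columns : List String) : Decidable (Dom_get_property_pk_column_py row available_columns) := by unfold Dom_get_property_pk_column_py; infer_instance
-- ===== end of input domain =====

-- B replaces A's two passes over the candidate list with a single pass threading a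
-- fallback accumulator (objective: simpler).

-- ===== PORT A =====
-- A: first loop returns the first candidate in both row and available_columns;
-- second loop returns the first candidate in row; else None.
def get_property_pk_column_py (row : List (String × String)) (available_columns : List String) : Option String :=
  let candidates : List String := ["property_id", "id", "property_reference"]
  match candidates.find? (fun col => row.any (fun p => p.1 == col) && available_columns.contains col) with
  | some col => some col
  | none => candidates.find? (fun col => row.any (fun p => p.1 == col))

-- ===== PORT B =====
-- single pass with a fallback accumulator (Source B's loop)
def pkAltLoop (row : List (String × String)) (available_columns : List String) :
    List String → Option String → Option String
  | [], fb => fb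
  | col :: rest, fb =>
    if row.any (fun p => p.1 == col) then
      if available_columns.contains col then some col
      else pkAltLoop row available_columns rest (if fb.isNone then some col else fb)
    else pkAltLoop row available_columns rest fb

def get_property_pk_column_py_alt (row : List (String × String)) (available_columns : List String) : Option String :=
  pkAltLoop row available_columns ["property_id", "id", "property_reference"] none

-- ===== PRECONDITION & SPEC =====
def Spec_get_property_pk_column_py (row : List (String × String)) (available_columns : List String) (out : Option String) : Prop := out = get_property_pk_column_py_alt row available_columns
instance (row : List (String × String)) (available_columns : List String) (out : Option String) : Decidable (Spec_get_property_pk_column_py row available_columns out) := by unfold Spec_get_property_pk_column_py; infer_instance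

-- ===== CLAIM (what is proved, stated in full; the proofs are below) =====
def Claim_equal_get_property_pk_column_py : Prop := ∀ (row : List (String × String)) (available_columns : List String), Dom_get_property_pk_column_py row available_columns → Spec_get_property_pk_column_py row available_columns (get_property_pk_column_py row available_columns)

-- ===== LEMMAS AND PROOFS =====

-- ===== VERDICT (by name: the statement is the Claim_ definition above) =====
theorem get_property_pk_column_py_spec : Claim_equal_get_property_pk_column_py := by
  intro row avail _
  unfold Spec_get_property_pk_column_py get_property_pk_column_py get_property_pk_column_py_alt
  cases h1 : row.any (fun p => p.1 == "property_id") <;>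
  cases h2 : row.any (fun p => p.1 == "id") <;>
  cases h3 : row.any (fun p => p.1 == "property_reference") <;>
  by_cases h4 : "property_id" ∈ avail <;>
  by_cases h5 : "id" ∈ avail <;>
  by_cases h6 : "property_reference" ∈ avail <;>
    simp [pkAltLoop, List.find?, h1, h2, h3, h4, h5, h6]
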